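-- pv_equiv track=rewrite | github.com/grewwc/internal-energy-dissipation | sympy2mathematica.py | find_all_in_brace
-- ===== SOURCE A (Python) =====
-- def find_all_in_brace(s: str):
--     res = []
--     in_brace = False
--     for ch in s:
--         if ch == '(':
--             in_brace = True
--         elif ch == ')':
--             in_brace = False
--         elif in_brace:
--             res.append(ch)
--         elif ch == '\n':
--             res.append('\0')
--     return [line for line in ''.join(res).split('\0') if line.strip()]
-- ===== SOURCE B (Python) =====
-- def find_all_in_brace(s: str):
--     # Segment-jumping scan: str.find jumps to the next relevant paren; slice-level
--     # count/replace process whole segments instead of a per-char state machine.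
--     lines = []
--     cur = ''
--     i = 0
--     inside = False
--     while True:
--         j = s.find(')' if inside else '(', i)
--         seg = s[i:] if j < 0 else s[i:j]
--         if inside:
--             cur += seg.replace('(', '')
--         else:
--             k = seg.count('\n')
--             if k:
--                 lines.append(cur)
--                 lines.extend([''] * (k - 1))
--                 cur = ''
--         if j < 0:
--             break
--         inside = not inside
--         i = j + 1
--     lines.append(cur)
--     return [line for line in lines if line.strip()]
-- ===== Notes on version B (the rewrite author's own statement) =====
-- stated objective: faster
-- what changed: B replaces A's per-character state machine (append each char or a '\0' sentinel, join, split) by a segment-jumping scan: str.find locates the next relevant paren and each whole slice between parens is processed at once with slice-level replace/count, flushing lines directly.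
import Mathlib
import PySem

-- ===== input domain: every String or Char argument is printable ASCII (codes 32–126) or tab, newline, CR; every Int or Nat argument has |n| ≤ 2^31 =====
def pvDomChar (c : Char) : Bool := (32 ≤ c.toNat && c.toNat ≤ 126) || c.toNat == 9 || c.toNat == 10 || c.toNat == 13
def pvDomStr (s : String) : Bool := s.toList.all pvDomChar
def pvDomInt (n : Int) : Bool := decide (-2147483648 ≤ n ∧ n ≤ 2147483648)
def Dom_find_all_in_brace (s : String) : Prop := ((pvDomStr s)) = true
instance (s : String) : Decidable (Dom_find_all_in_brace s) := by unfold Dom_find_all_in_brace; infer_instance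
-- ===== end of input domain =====

-- B replaces A's per-char state machine + '\0'-sentinel/join/split by a segment-jumping scan
-- (find next paren, process the whole slice at once); objective: alternative decomposition.

-- ===== PORT A =====
-- state: (res, in_brace); one fold step per character, branches in A's order
def stepA (st : List Char × Bool) (ch : Char) : List Char × Bool :=
  if ch = '(' then (st.1, true)
  else if ch = ')' then (st.1, false)
  else if st.2 then (st.1 ++ [ch], st.2)
  else if ch = '\n' then (st.1 ++ ['\u0000'], st.2)
  else st

def find_all_in_brace (s : String) : List String :=
  ((PySem.Chars.splitOn (s.toList.foldl stepA ([], false)).1 ['\u0000']).filter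
    (fun l => !(PySem.Chars.strip l).isEmpty)).map String.ofList

-- ===== PORT B =====
-- s.find(tgt, i) + slicing, ported as: split the remaining chars at the first tgt
-- (segment before it, and `some rest` after it, `none` if absent) — exact for find+slice
def findSplit (tgt : Char) : List Char → List Char × Option (List Char)
  | [] => ([], none)
  | c :: cs =>
    if c = tgt then ([], some cs)
    else (c :: (findSplit tgt cs).1, (findSplit tgt cs).2)

theorem findSplit_some_length (tgt : Char) (l r : List Char)
    (h : (findSplit tgt l).2 = some r) : r.length < l.length := by
  induction l with
  | nil => simp [findSplit] at h
  | cons c cs ih =>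
    simp only [findSplit] at h
    split at h
    · cases h; simp
    · exact Nat.lt_trans (ih h) (by simp)

-- the while loop of Source B, one recursive call per found paren
def goB (inside : Bool) (lines : List (List Char)) (cur : List Char)
    (rest : List Char) : List (List Char) :=
  let fs := findSplit (if inside then ')' else '(') rest
  let seg := fs.1
  let st :=
    if inside then (lines, cur ++ seg.filter (fun c => c ≠ '('))
    else
      let k := seg.count '\n'
      if k = 0 then (lines, cur)
      else (lines ++ [cur] ++ List.replicate (k - 1) [], ([] : List Char))
  match h : fs.2 with
  | none => st.1 ++ [st.2]
  | some r => goB (!inside) st.1 st.2 r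
termination_by rest.length
decreasing_by exact findSplit_some_length _ _ _ h

def find_all_in_brace_alt (s : String) : List String :=
  ((goB false [] [] s.toList).filter
    (fun l => !(PySem.Chars.strip l).isEmpty)).map String.ofList

-- ===== PRECONDITION & SPEC =====
def Spec_find_all_in_brace (s : String) (out : List String) : Prop := out = find_all_in_brace_alt s
instance (s : String) (out : List String) : Decidable (Spec_find_all_in_brace s out) := by unfold Spec_find_all_in_brace; infer_instance

-- ===== CLAIM (what is proved, stated in full; the proofs are below) =====
def Claim_equal_find_all_in_brace : Prop := ∀ (s : String), Dom_find_all_in_brace s → Spec_find_all_in_brace s (find_all_in_brace s)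

-- ===== LEMMAS AND PROOFS =====

-- specification of splitting a char list on the '\0' separator
def splitNul : List Char → List (List Char)
  | [] => [[]]
  | c :: cs =>
    if c = '\u0000' then [] :: splitNul cs
    else match splitNul cs with
      | [] => [[c]]
      | p :: ps => (c :: p) :: ps

theorem splitNul_ne_nil (cs : List Char) : splitNul cs ≠ [] := by
  cases cs with
  | nil => simp [splitNul]
  | cons c cs =>
    simp only [splitNul]
    split
    · simp
    · cases h : splitNul cs <;> simp

theorem splitOn_go_eq (l : List Char) : ∀ (fuel : Nat) (cur : List Char)
    (acc : List (List Char)), l.length < fuel →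
    PySem.Chars.splitOn.go ['\u0000'] fuel l cur acc
      = acc.reverse ++ (splitNul l).modifyHead (cur.reverse ++ ·) := by
  induction l with
  | nil =>
    intro fuel cur acc h
    match fuel with
    | fuel + 1 => simp [PySem.Chars.splitOn.go, splitNul]
  | cons c rest ih =>
    intro fuel cur acc h
    match fuel with
    | fuel + 1 =>
      rw [PySem.Chars.splitOn.go]
      by_cases hc : c = '\u0000'
      · subst hc
        have hpre : List.isPrefixOf ['\u0000'] ('\u0000' :: rest) = true := by
          simp [List.isPrefixOf]
        simp only [hpre, if_pos]
        rw [show List.drop (['\u0000'] : List Char).length ('\u0000' :: rest) = rest from rfl]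
        rw [ih fuel [] (cur.reverse :: acc) (by simpa using Nat.lt_of_succ_lt_succ h)]
        cases hs : splitNul rest with
        | nil => exact absurd hs (splitNul_ne_nil rest)
        | cons p ps => simp [splitNul, hs]
      · have hpre : List.isPrefixOf ['\u0000'] (c :: rest) = false := by
          simp [List.isPrefixOf]
          exact fun h => hc h.symm
        simp only [hpre, Bool.false_eq_true, if_false]
        rw [ih fuel (c :: cur) acc (by simpa using Nat.lt_of_succ_lt_succ h)]
        simp only [splitNul, hc, if_false]
        cases hs : splitNul rest with
        | nil => exact absurd hs (splitNul_ne_nil rest)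
        | cons p ps => simp

theorem splitOn_eq_splitNul (cs : List Char) :
    PySem.Chars.splitOn cs ['\u0000'] = splitNul cs := by
  show PySem.Chars.splitOn.go ['\u0000'] (cs.length + 1) cs [] [] = _
  rw [splitOn_go_eq cs (cs.length + 1) [] [] (Nat.lt_succ_self _)]
  simp
  cases hs : splitNul cs with
  | nil => exact absurd hs (splitNul_ne_nil cs)
  | cons p ps => simp

theorem splitNul_append_nul (res : List Char) :
    splitNul (res ++ ['\u0000']) = splitNul res ++ [[]] := by
  induction res with
  | nil => simp [splitNul]
  | cons d res ih =>
    simp only [List.cons_append, splitNul, ih]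
    by_cases hd : d = '\u0000'
    · simp [hd]
    · simp only [hd, if_false]
      cases hs : splitNul res with
      | nil => exact absurd hs (splitNul_ne_nil res)
      | cons p ps => simp

theorem splitNul_append_char (c : Char) (hc : c ≠ '\u0000') :
    ∀ (res : List Char) (ls : List (List Char)) (b : List Char),
    splitNul res = ls ++ [b] → splitNul (res ++ [c]) = ls ++ [b ++ [c]] := by
  intro res
  induction res with
  | nil =>
    intro ls b h
    simp only [splitNul] at h
    cases ls with
    | nil =>
      simp only [List.nil_append, List.cons.injEq] at h
      rw [← h.1]
      simp [splitNul, hc]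
    | cons x xs => simp at h
  | cons d res ih =>
    intro ls b h
    by_cases hd : d = '\u0000'
    · subst hd
      rw [show splitNul ('\u0000' :: res) = [] :: splitNul res from by simp [splitNul]] at h
      cases ls with
      | nil =>
        simp only [List.nil_append, List.cons.injEq] at h
        exact absurd h.2 (splitNul_ne_nil res)
      | cons l0 ls' =>
        simp only [List.cons_append, List.cons.injEq] at h
        obtain ⟨h0, hrest⟩ := h
        rw [List.cons_append,
          show splitNul ('\u0000' :: (res ++ [c])) = [] :: splitNul (res ++ [c]) from by
            simp [splitNul]]
        rw [ih ls' b hrest, ← h0]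
        simp
    · simp only [splitNul, hd, if_false] at h
      cases hs : splitNul res with
      | nil => exact absurd hs (splitNul_ne_nil res)
      | cons p ps =>
        rw [hs] at h
        simp only [List.cons_append, splitNul, hd, if_false]
        cases ls with
        | nil =>
          simp only [List.nil_append, List.cons.injEq] at h
          obtain ⟨h0, hps⟩ := h
          rw [ih [] p (by rw [hs, hps]; rfl)]
          simp [← h0]
        | cons l0 ls' =>
          simp only [List.cons_append, List.cons.injEq] at h
          obtain ⟨h0, hps⟩ := h
          rw [ih (p :: ls') b (by rw [hs, hps]; rfl)]
          simp [← h0]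

theorem splitNul_append_list (filt : List Char) (hf : ∀ c ∈ filt, c ≠ '\u0000') :
    ∀ (res : List Char) (ls : List (List Char)) (b : List Char),
    splitNul res = ls ++ [b] → splitNul (res ++ filt) = ls ++ [b ++ filt] := by
  induction filt with
  | nil => intro res ls b h; simpa using h
  | cons c cs ih =>
    intro res ls b h
    have h1 := splitNul_append_char c (hf c (List.mem_cons_self ..)) res ls b h
    have := ih (fun x hx => hf x (List.mem_cons_of_mem _ hx)) (res ++ [c]) ls (b ++ [c]) h1
    simpa using this

theorem splitNul_append_nuls (k : Nat) : ∀ (res : List Char),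
    splitNul (res ++ List.replicate k '\u0000') = splitNul res ++ List.replicate k [] := by
  induction k with
  | zero => simp
  | succ k ih =>
    intro res
    rw [List.replicate_succ, show res ++ '\u0000' :: List.replicate k '\u0000'
        = (res ++ ['\u0000']) ++ List.replicate k '\u0000' from by simp,
      ih, splitNul_append_nul]
    simp [List.replicate_succ]

-- A's fold over an outside segment (no '('): contributes one '\0' per newline
theorem foldA_outside (seg : List Char) (h : '(' ∉ seg) :
    ∀ res, seg.foldl stepA (res, false)
      = (res ++ List.replicate (seg.count '\n') '\u0000', false) := by
  induction seg with
  | nil => intro res; simp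
  | cons c cs ih =>
    intro res
    have hc : c ≠ '(' := fun hc => h (hc ▸ List.mem_cons_self ..)
    have h' : '(' ∉ cs := fun hm => h (List.mem_cons_of_mem _ hm)
    simp only [List.foldl_cons]
    by_cases h2 : c = ')'
    · subst h2
      rw [show stepA (res, false) ')' = (res, false) from by simp [stepA]]
      rw [ih h' res]
      simp [List.count_cons]
    · by_cases h4 : c = '\n'
      · subst h4
        rw [show stepA (res, false) '\n' = (res ++ ['\u0000'], false) from by
          simp [stepA]]
        rw [ih h' (res ++ ['\u0000'])]
        simp [List.count_cons, List.replicate_succ]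
      · rw [show stepA (res, false) c = (res, false) from by
          simp [stepA, hc, h2, h4]]
        rw [ih h' res]
        simp [List.count_cons, h4]

-- A's fold over an inside segment (no ')'): appends the segment minus '(' chars
theorem foldA_inside (seg : List Char) (h : ')' ∉ seg) :
    ∀ res, seg.foldl stepA (res, true)
      = (res ++ seg.filter (fun c => c ≠ '('), true) := by
  induction seg with
  | nil => intro res; simp
  | cons c cs ih =>
    intro res
    have h' : ')' ∉ cs := fun hm => h (List.mem_cons_of_mem _ hm)
    have hc : c ≠ ')' := fun hc => h (hc ▸ List.mem_cons_self ..)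
    simp only [List.foldl_cons]
    by_cases h1 : c = '('
    · subst h1
      rw [show stepA (res, true) '(' = (res, true) from by simp [stepA]]
      rw [ih h' res]
      simp [List.filter_cons]
    · rw [show stepA (res, true) c = (res ++ [c], true) from by
        simp [stepA, h1, hc]]
      rw [ih h' (res ++ [c])]
      simp [List.filter_cons, h1]

-- findSplit decomposes its input: tgt-free segment, then (optionally) tgt and the rest
theorem findSplit_spec (tgt : Char) (l : List Char) :
    tgt ∉ (findSplit tgt l).1 ∧
    (match (findSplit tgt l).2 with
     | none => l = (findSplit tgt l).1
     | some r => l = (findSplit tgt l).1 ++ tgt :: r) := by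
  induction l with
  | nil => simp [findSplit]
  | cons c cs ih =>
    simp only [findSplit]
    by_cases hc : c = tgt
    · simp [hc]
    · simp only [hc, if_false]
      refine ⟨by simp [Ne.symm hc, ih.1], ?_⟩
      have := ih.2
      cases h : (findSplit tgt cs).2 with
      | none => simp only [h] at this ⊢; simp [← this]
      | some r => simp only [h] at this ⊢; simp [← this]

-- main invariant: goB's (lines, cur) state tracks the '\0'-split of A's res
theorem invB (n : Nat) : ∀ (rest : List Char), rest.length ≤ n →
    ∀ (res : List Char) (lines : List (List Char)) (cur : List Char) (ib : Bool),
    (∀ c ∈ rest, c ≠ '\u0000') →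
    splitNul res = lines ++ [cur] →
    splitNul (rest.foldl stepA (res, ib)).1 = goB ib lines cur rest := by
  induction n with
  | zero =>
    intro rest hn res lines cur ib hnn h
    have : rest = [] := List.eq_nil_of_length_eq_zero (Nat.le_zero.mp hn)
    subst this
    simp only [List.foldl_nil, goB, findSplit]
    simpa using h
  | succ n ih =>
    intro rest hn res lines cur ib hnn h
    rw [goB]
    obtain ⟨hseg, hdec⟩ := findSplit_spec (if ib then ')' else '(') rest
    set fs := findSplit (if ib then ')' else '(') rest with hfs
    -- the state after processing the segment, on both sides
    cases ib
    · -- outside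
      simp only [if_false, Bool.false_eq_true] at hseg hdec hfs ⊢
      have hsegA : ∀ r, fs.1.foldl stepA (r, false)
          = (r ++ List.replicate (fs.1.count '\n') '\u0000', false) :=
        foldA_outside fs.1 hseg
      have hsplit' : splitNul (res ++ List.replicate (fs.1.count '\n') '\u0000')
          = (lines ++ [cur]) ++ List.replicate (fs.1.count '\n') [] := by
        rw [splitNul_append_nuls, h]
      have hstate :
          splitNul (res ++ List.replicate (fs.1.count '\n') '\u0000')
            = (if fs.1.count '\n' = 0 then (lines, cur)
               else (lines ++ [cur] ++ List.replicate (fs.1.count '\n' - 1) [],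
                     ([] : List Char))).1
              ++ [(if fs.1.count '\n' = 0 then (lines, cur)
                   else (lines ++ [cur] ++ List.replicate (fs.1.count '\n' - 1) [],
                         ([] : List Char))).2] := by
        by_cases hk : fs.1.count '\n' = 0
        · simp [hk, hsplit', h]
        · obtain ⟨m, hm⟩ := Nat.exists_eq_succ_of_ne_zero hk
          simp only [hk, if_false, hm, List.replicate_succ']
          rw [show res ++ (List.replicate m '\u0000' ++ ['\u0000'])
                = (res ++ List.replicate m '\u0000') ++ ['\u0000'] from by simp,
            splitNul_append_nul, splitNul_append_nuls, h]
          simp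
      cases hopt : fs.2 with
      | none =>
        have hrest : rest = fs.1 := by simpa [hopt] using hdec
        simp only [hopt]
        rw [hrest, hsegA res]
        exact hstate
      | some r =>
        have hrest : rest = fs.1 ++ '(' :: r := by simpa [hopt] using hdec
        simp only [hopt]
        have hlen : r.length ≤ n := by
          have := hn; rw [hrest] at this; simp at this; omega
        have hnn' : ∀ c ∈ r, c ≠ '\u0000' := by
          intro c hc; exact hnn c (by rw [hrest]; simp [hc])
        rw [hrest, List.foldl_append, List.foldl_cons, hsegA res,
          show stepA (res ++ List.replicate (fs.1.count '\n') '\u0000', false) '('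
            = (res ++ List.replicate (fs.1.count '\n') '\u0000', true) from by simp [stepA]]
        exact ih r hlen _ _ _ true hnn' hstate
    · -- inside
      simp only [if_true] at hseg hdec hfs ⊢
      have hsegA : ∀ r, fs.1.foldl stepA (r, true)
          = (r ++ fs.1.filter (fun c => c ≠ '('), true) :=
        foldA_inside fs.1 hseg
      have hfnn : ∀ c ∈ fs.1.filter (fun c => c ≠ '('), c ≠ '\u0000' := by
        intro c hc
        have hmem : c ∈ fs.1 := List.mem_of_mem_filter hc
        cases hopt : fs.2 with
        | none =>
          have : rest = fs.1 := by simpa [hopt] using hdec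
          exact hnn c (this ▸ hmem)
        | some r =>
          have : rest = fs.1 ++ ')' :: r := by simpa [hopt] using hdec
          exact hnn c (by rw [this]; simp [hmem])
      have hstate : splitNul (res ++ fs.1.filter (fun c => c ≠ '('))
          = lines ++ [cur ++ fs.1.filter (fun c => c ≠ '(')] :=
        splitNul_append_list _ hfnn res lines cur h
      cases hopt : fs.2 with
      | none =>
        have hrest : rest = fs.1 := by simpa [hopt] using hdec
        simp only [hopt]
        rw [hrest, hsegA res]
        exact hstate
      | some r =>
        have hrest : rest = fs.1 ++ ')' :: r := by simpa [hopt] using hdec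
        simp only [hopt]
        have hlen : r.length ≤ n := by
          have := hn; rw [hrest] at this; simp at this; omega
        have hnn' : ∀ c ∈ r, c ≠ '\u0000' := by
          intro c hc; exact hnn c (by rw [hrest]; simp [hc])
        rw [hrest, List.foldl_append, List.foldl_cons, hsegA res,
          show stepA (res ++ fs.1.filter (fun c => c ≠ '('), true) ')'
            = (res ++ fs.1.filter (fun c => c ≠ '('), false) from by simp [stepA]]
        exact ih r hlen _ _ _ false hnn' hstate

-- ===== VERDICT (by name: the statement is the Claim_ definition above) =====
theorem find_all_in_brace_spec : Claim_equal_find_all_in_brace := by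
  intro s hdom
  unfold Spec_find_all_in_brace find_all_in_brace find_all_in_brace_alt
  have hnn : ∀ c ∈ s.toList, c ≠ '\u0000' := by
    intro c hc hzero
    have := List.all_eq_true.mp hdom c hc
    subst hzero
    simp [pvDomChar] at this
  rw [splitOn_eq_splitNul,
    invB s.toList.length s.toList (Nat.le_refl _) [] [] [] false hnn (by simp [splitNul])]
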